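-- pv_equiv track=rewrite | github.com/YashSoni4115/catanthropic | ai/economy/board/profile.py | _tile_neighbors
-- ===== SOURCE A (Python) =====
-- from typing import Dict, List, Optional, Sequence, Tuple
--
-- Tile = Dict[str, object]
--
-- Coord = Tuple[int, int]
--
-- def _tile_vertices(tile: Tile) -> set[Tuple[int, int, int]]:
--     x_coord = int(tile["x"])
--     y_coord = int(tile["y"])
--     return {
--         (x_coord, y_coord, 0),
--         (x_coord, y_coord, 1),
--         (x_coord + 1, y_coord + 1, 1),
--         (x_coord - 1, y_coord - 1, 0),
--         (x_coord, y_coord + 1, 1),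
--         (x_coord, y_coord - 1, 0),
--     }
--
-- def _tile_neighbors(tiles: Sequence[Tile]) -> Dict[Coord, List[Coord]]:
--     keyed_tiles = {
--         (int(tile["x"]), int(tile["y"])): tile
--         for tile in tiles
--         if isinstance(tile.get("x"), int) and isinstance(tile.get("y"), int)
--     }
--     vertices = {coord: _tile_vertices(tile) for coord, tile in keyed_tiles.items()}
--     neighbors: Dict[Coord, List[Coord]] = {coord: [] for coord in keyed_tiles.keys()}
--     coords = list(keyed_tiles.keys())
--     for index, left in enumerate(coords):
--         for right in coords[index + 1:]:
--             if len(vertices[left].intersection(vertices[right])) >= 2: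
--                 neighbors[left].append(right)
--                 neighbors[right].append(left)
--     return {coord: sorted(values) for coord, values in neighbors.items()}
-- ===== SOURCE B (Python) =====
-- from typing import Dict, List, Sequence, Tuple
--
-- Tile = Dict[str, object]
-- Coord = Tuple[int, int]
--
-- # Two tiles share >= 2 vertices exactly when their coordinate difference is one of
-- # these six offsets; listed in lexicographic order, so each neighbor list comes out sorted.
-- _DELTAS = [(-1, -1), (-1, 0), (0, -1), (0, 1), (1, 0), (1, 1)]
--
--
-- def _tile_neighbors(tiles: Sequence[Tile]) -> Dict[Coord, List[Coord]]:
--     coords = list(dict.fromkeys(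
--         (int(tile["x"]), int(tile["y"]))
--         for tile in tiles
--         if isinstance(tile.get("x"), int) and isinstance(tile.get("y"), int)
--     ))
--     present = set(coords)
--     return {
--         c: [n for n in ((c[0] + dx, c[1] + dy) for dx, dy in _DELTAS) if n in present]
--         for c in coords
--     }
-- ===== Notes on version B (the rewrite author's own statement) =====
-- stated objective: alternative
-- what changed: Replaces the all-pairs vertex-set-intersection scan with a direct neighbor lookup: two tiles share >= 2 vertices exactly when their coordinate difference is one of six fixed offsets, so B dedups the coordinates once and probes the six offsets per tile in a hash set.
import Mathlib
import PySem

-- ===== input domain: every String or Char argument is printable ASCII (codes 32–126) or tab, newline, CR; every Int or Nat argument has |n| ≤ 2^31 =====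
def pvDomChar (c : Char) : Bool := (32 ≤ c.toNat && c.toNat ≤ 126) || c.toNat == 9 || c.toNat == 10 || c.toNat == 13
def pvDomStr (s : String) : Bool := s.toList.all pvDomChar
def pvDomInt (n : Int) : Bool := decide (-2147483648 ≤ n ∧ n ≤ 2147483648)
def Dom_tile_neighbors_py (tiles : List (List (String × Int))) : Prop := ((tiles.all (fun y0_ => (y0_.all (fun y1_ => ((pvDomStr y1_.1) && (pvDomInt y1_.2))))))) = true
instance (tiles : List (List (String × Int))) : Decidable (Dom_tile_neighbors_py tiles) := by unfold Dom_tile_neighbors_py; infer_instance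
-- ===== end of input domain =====

-- ===== PORT A =====
-- B replaces A's all-pairs vertex-set-intersection scan with a per-tile probe of the six
-- fixed neighbor offsets over a deduplicated coordinate set (objective: alternative algorithm).

-- shared guard/key of both Pythons: 'isinstance(tile.get("x"), int) and isinstance(tile.get("y"), int)'
-- (every value of the Lean tile dict is an Int, so the isinstance test is key presence)
def pvHasXY (tile : List (String × Int)) : Bool :=
  (PySem.Dict.mk tile).contains "x" && (PySem.Dict.mk tile).contains "y"

-- '(int(tile["x"]), int(tile["y"]))': callers evaluate it only under pvHasXY, so the
-- getD defaults are unreachable (no KeyError)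
def pvKey (tile : List (String × Int)) : Int × Int :=
  ((PySem.Dict.mk tile).getD "x" 0, (PySem.Dict.mk tile).getD "y" 0)

-- _tile_vertices: the set literal of the six vertices of a tile
def pvTileVertices (tile : List (String × Int)) : PySem.Set (Int × Int × Int) :=
  let x := (PySem.Dict.mk tile).getD "x" 0   -- int(tile["x"]): key present at every call site
  let y := (PySem.Dict.mk tile).getD "y" 0
  PySem.Set.ofList [(x, y, 0), (x, y, 1), (x + 1, y + 1, 1), (x - 1, y - 1, 0), (x, y + 1, 1), (x, y - 1, 0)]

def tile_neighbors_py (tiles : List (List (String × Int))) : List (Int × Int × List (Int × Int)) :=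
  let keyed : PySem.Dict (Int × Int) (List (String × Int)) :=
    (tiles.filter pvHasXY).foldl (fun d tile => d.insert (pvKey tile) tile) PySem.Dict.empty
  let vertices : PySem.Dict (Int × Int) (PySem.Set (Int × Int × Int)) :=
    keyed.items.foldl (fun d p => d.insert p.1 (pvTileVertices p.2)) PySem.Dict.empty
  let neighbors0 : PySem.Dict (Int × Int) (List (Int × Int)) :=
    keyed.keys.foldl (fun d c => d.insert c ([] : List (Int × Int))) PySem.Dict.empty
  let coords : List (Int × Int) := keyed.keys
  let neighbors :=
    (PySem.List.enumerate coords).foldl (fun nb p =>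
      (PySem.List.slice coords (some (p.1 + 1)) none).foldl (fun nb right =>
        -- vertices[left] / vertices[right]: both keys are in coords, so the ∅ default is unreachable
        if 2 ≤ PySem.Set.len (PySem.Set.inter (vertices.getD p.2 PySem.Set.empty)
                                              (vertices.getD right PySem.Set.empty)) then
          -- neighbors[left].append(right); neighbors[right].append(left) (keys always present)
          (nb.modify p.2 [] (fun l => l ++ [right])).modify right [] (fun l => l ++ [p.2])
        else nb) nb) neighbors0
  neighbors.items.map (fun p => (p.1.1, p.1.2, PySem.List.sorted2 p.2 (fun v => v.1) (fun v => v.2) false))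

-- ===== PORT B =====
-- _DELTAS, listed in lexicographic order
def pvDeltas : List (Int × Int) := [(-1, -1), (-1, 0), (0, -1), (0, 1), (1, 0), (1, 1)]

def tile_neighbors_py_alt (tiles : List (List (String × Int))) : List (Int × Int × List (Int × Int)) :=
  let coords : List (Int × Int) := PySem.List.dedup ((tiles.filter pvHasXY).map pvKey)
  let present : PySem.Set (Int × Int) := PySem.Set.ofList coords
  coords.map (fun c =>
    (c.1, c.2,
      (pvDeltas.map (fun d => (c.1 + d.1, c.2 + d.2))).filter (fun n => PySem.Set.contains present n)))

-- ===== PRECONDITION & SPEC =====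
def Spec_tile_neighbors_py (tiles : List (List (String × Int))) (out : List (Int × Int × List (Int × Int))) : Prop := out = tile_neighbors_py_alt tiles
instance (tiles : List (List (String × Int))) (out : List (Int × Int × List (Int × Int))) : Decidable (Spec_tile_neighbors_py tiles out) := by unfold Spec_tile_neighbors_py; infer_instance

-- ===== CLAIM (what is proved, stated in full; the proofs are below) =====
def Claim_equal_tile_neighbors_py : Prop := ∀ (tiles : List (List (String × Int))), Dom_tile_neighbors_py tiles → Spec_tile_neighbors_py tiles (tile_neighbors_py tiles)

-- ===== LEMMAS AND PROOFS =====

-- the vertex set of the tile at coordinate c (what _tile_vertices computes, as a function of the key)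
def pvV (c : Int × Int) : PySem.Set (Int × Int × Int) :=
  PySem.Set.ofList [(c.1, c.2, 0), (c.1, c.2, 1), (c.1 + 1, c.2 + 1, 1), (c.1 - 1, c.2 - 1, 0), (c.1, c.2 + 1, 1), (c.1, c.2 - 1, 0)]

-- A's adjacency test as a function of the two coordinates
def pvAdj (a b : Int × Int) : Bool :=
  decide (2 ≤ PySem.Set.len (PySem.Set.inter (pvV a) (pvV b)))

theorem pvTileVertices_eq (tile : List (String × Int)) : pvTileVertices tile = pvV (pvKey tile) := rfl

theorem pvTwo_le_length_iff {α : Type} (l : List α) (hnd : l.Nodup) :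
    2 ≤ l.length ↔ ∃ u v, u ≠ v ∧ u ∈ l ∧ v ∈ l := by
  match l with
  | [] => simp
  | [x] =>
    simp only [List.length_singleton, List.mem_singleton]
    constructor
    · omega
    · rintro ⟨u, v, hne, rfl, rfl⟩; exact absurd rfl hne
  | x :: y :: rest =>
    simp only [List.length_cons]
    constructor
    · intro _
      exact ⟨x, y, by rintro rfl; simp at hnd, List.mem_cons_self,
        List.mem_cons_of_mem _ List.mem_cons_self⟩
    · intro _; omega

theorem pvMem_V (y : Int × Int × Int) (c : Int × Int) :
    y ∈ pvV c ↔ y ∈ [(c.1, c.2, 0), (c.1, c.2, 1), (c.1 + 1, c.2 + 1, 1), (c.1 - 1, c.2 - 1, 0), (c.1, c.2 + 1, 1), (c.1, c.2 - 1, 0)] := by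
  exact PySem.Set.mem_ofList _ y

theorem pvAdj_iff (a b : Int × Int) (hab : a ≠ b) :
    pvAdj a b = true ↔ (b.1 - a.1, b.2 - a.2) ∈ pvDeltas := by
  rcases a with ⟨a1, a2⟩; rcases b with ⟨b1, b2⟩
  rw [ne_eq, Prod.mk.injEq] at hab
  have hnd : (PySem.Set.inter (pvV (a1, a2)) (pvV (b1, b2))).Nodup :=
    List.Nodup.filter _ (PySem.Set.nodup_ofList _)
  rw [pvAdj, decide_eq_true_eq, PySem.Set.len,
    show ((2 : Int) ≤ (PySem.Set.inter (pvV (a1, a2)) (pvV (b1, b2))).length ↔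
      2 ≤ (PySem.Set.inter (pvV (a1, a2)) (pvV (b1, b2))).length) from by exact_mod_cast Iff.rfl,
    pvTwo_le_length_iff _ hnd]
  constructor
  · rintro ⟨u, v, hne, hu, hv⟩
    rw [PySem.Set.mem_inter] at hu hv
    obtain ⟨hu1, hu2⟩ := hu
    obtain ⟨hv1, hv2⟩ := hv
    rw [pvMem_V] at hu1 hu2 hv1 hv2
    obtain ⟨u1, u2, u3⟩ := u
    obtain ⟨v1, v2, v3⟩ := v
    simp only [List.mem_cons, List.not_mem_nil, or_false, pvDeltas, Prod.ext_iff] at hu1 hu2 hv1 hv2 ⊢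
    simp only [ne_eq, Prod.ext_iff] at hne
    rcases hu1 with h1|h1|h1|h1|h1|h1 <;> rcases hu2 with h2|h2|h2|h2|h2|h2 <;>
      rcases hv1 with h3|h3|h3|h3|h3|h3 <;> rcases hv2 with h4|h4|h4|h4|h4|h4 <;> omega
  · intro hd
    simp only [pvDeltas, List.mem_cons, List.not_mem_nil, or_false, Prod.mk.injEq] at hd
    have mem2 : ∀ u : Int × Int × Int,
        u ∈ pvV (a1, a2) → u ∈ pvV (b1, b2) → u ∈ PySem.Set.inter (pvV (a1, a2)) (pvV (b1, b2)) := by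
      intro u h1 h2; rw [PySem.Set.mem_inter]; exact ⟨h1, h2⟩
    rcases hd with h | h | h | h | h | h
    · exact ⟨(a1 - 1, a2 - 1, 0), (a1, a2, 1), by simp [Prod.ext_iff] <;> omega,
        mem2 _ (by rw [pvMem_V]; simp [Prod.ext_iff] <;> omega) (by rw [pvMem_V]; simp [Prod.ext_iff] <;> omega),
        mem2 _ (by rw [pvMem_V]; simp [Prod.ext_iff] <;> omega) (by rw [pvMem_V]; simp [Prod.ext_iff] <;> omega)⟩
    · exact ⟨(a1 - 1, a2 - 1, 0), (a1, a2 + 1, 1), by simp [Prod.ext_iff] <;> omega,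
        mem2 _ (by rw [pvMem_V]; simp [Prod.ext_iff] <;> omega) (by rw [pvMem_V]; simp [Prod.ext_iff] <;> omega),
        mem2 _ (by rw [pvMem_V]; simp [Prod.ext_iff] <;> omega) (by rw [pvMem_V]; simp [Prod.ext_iff] <;> omega)⟩
    · exact ⟨(a1, a2 - 1, 0), (a1, a2, 1), by simp [Prod.ext_iff] <;> omega,
        mem2 _ (by rw [pvMem_V]; simp [Prod.ext_iff] <;> omega) (by rw [pvMem_V]; simp [Prod.ext_iff] <;> omega),
        mem2 _ (by rw [pvMem_V]; simp [Prod.ext_iff] <;> omega) (by rw [pvMem_V]; simp [Prod.ext_iff] <;> omega)⟩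
    · exact ⟨(a1, a2, 0), (a1, a2 + 1, 1), by simp [Prod.ext_iff] <;> omega,
        mem2 _ (by rw [pvMem_V]; simp [Prod.ext_iff] <;> omega) (by rw [pvMem_V]; simp [Prod.ext_iff] <;> omega),
        mem2 _ (by rw [pvMem_V]; simp [Prod.ext_iff] <;> omega) (by rw [pvMem_V]; simp [Prod.ext_iff] <;> omega)⟩
    · exact ⟨(a1, a2 - 1, 0), (a1 + 1, a2 + 1, 1), by simp [Prod.ext_iff] <;> omega,
        mem2 _ (by rw [pvMem_V]; simp [Prod.ext_iff] <;> omega) (by rw [pvMem_V]; simp [Prod.ext_iff] <;> omega),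
        mem2 _ (by rw [pvMem_V]; simp [Prod.ext_iff] <;> omega) (by rw [pvMem_V]; simp [Prod.ext_iff] <;> omega)⟩
    · exact ⟨(a1, a2, 0), (a1 + 1, a2 + 1, 1), by simp [Prod.ext_iff] <;> omega,
        mem2 _ (by rw [pvMem_V]; simp [Prod.ext_iff] <;> omega) (by rw [pvMem_V]; simp [Prod.ext_iff] <;> omega),
        mem2 _ (by rw [pvMem_V]; simp [Prod.ext_iff] <;> omega) (by rw [pvMem_V]; simp [Prod.ext_iff] <;> omega)⟩

theorem pvAdj_symm (a b : Int × Int) (hab : a ≠ b) : pvAdj a b = pvAdj b a := by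
  rw [Bool.eq_iff_iff, pvAdj_iff a b hab, pvAdj_iff b a (Ne.symm hab)]
  rcases a with ⟨a1, a2⟩; rcases b with ⟨b1, b2⟩
  simp only [pvDeltas, List.mem_cons, List.not_mem_nil, or_false, Prod.mk.injEq]
  omega

theorem pvSorted2_eq_sorted_lex (xs : List (Int × Int)) :
    PySem.List.sorted2 xs (fun v => v.1) (fun v => v.2) false
      = PySem.List.sorted xs (fun x => toLex x) false := by
  unfold PySem.List.sorted2 PySem.List.sorted
  simp only [if_neg (by decide : ¬ (false = true))]
  have h : (fun (a b : Int × Int) => decide (a.1 < b.1) || !decide (b.1 < a.1) && decide (a.2 < b.2))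
      = fun a b => decide (toLex a < toLex b) := by
    funext a b
    rcases a with ⟨a1, a2⟩; rcases b with ⟨b1, b2⟩
    simp [Prod.Lex.toLex_lt_toLex]
    by_cases h1 : a1 < b1 <;> by_cases h2 : b1 < a1 <;> simp [h1, h2] <;> omega
  rw [h]

theorem pvProbe_nodup (c : Int × Int) :
    ((pvDeltas.map (fun d => (c.1 + d.1, c.2 + d.2)))).Nodup := by
  refine List.Nodup.map_on ?_ (by decide)
  intro a ha b hb hab
  rcases a with ⟨a1, a2⟩; rcases b with ⟨b1, b2⟩
  simp only [Prod.mk.injEq] at hab ⊢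
  omega

theorem pvProbe_pairwise (c : Int × Int) :
    ((pvDeltas.map (fun d => (c.1 + d.1, c.2 + d.2)))).Pairwise
      (fun a b => toLex a < toLex b) := by
  have hbase : pvDeltas.Pairwise (fun a b => toLex a < toLex b) := by
    simp [pvDeltas, List.pairwise_cons, Prod.Lex.toLex_lt_toLex]
  refine List.Pairwise.map _ ?_ hbase
  intro a b hab
  rcases a with ⟨a1, a2⟩; rcases b with ⟨b1, b2⟩
  simp [Prod.Lex.toLex_lt_toLex] at hab ⊢
  omega

theorem pvSorted_filter_eq (coords : List (Int × Int)) (hnd : coords.Nodup) (c : Int × Int) :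
    PySem.List.sorted2 (coords.filter (fun d => d ≠ c && pvAdj c d)) (fun v => v.1) (fun v => v.2) false
      = (pvDeltas.map (fun d => (c.1 + d.1, c.2 + d.2))).filter
          (fun n => PySem.Set.contains (PySem.Set.ofList coords) n) := by
  rw [pvSorted2_eq_sorted_lex]
  apply PySem.List.sorted_eq_of_perm_of_pairwise_lt
  · rw [List.perm_ext_iff_of_nodup ((pvProbe_nodup c).filter _) (hnd.filter _)]
    intro y
    simp only [List.mem_filter, List.mem_map, PySem.Set.contains_iff, PySem.Set.mem_ofList]
    constructor
    · rintro ⟨⟨d, hd, rfl⟩, hy⟩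
      refine ⟨hy, ?_⟩
      have hne : (c.1 + d.1, c.2 + d.2) ≠ c := by
        rcases c with ⟨c1, c2⟩; rcases d with ⟨d1, d2⟩
        fin_cases hd <;> simp [Prod.mk.injEq] <;> omega
      have hadj : pvAdj c (c.1 + d.1, c.2 + d.2) = true := by
        rw [pvAdj_iff _ _ (Ne.symm hne)]; simpa using hd
      simp [hne, hadj]
    · rintro ⟨hy, hcond⟩
      have h1 := (Bool.and_eq_true _ _).mp hcond
      have hyc : y ≠ c := by simpa using h1.1
      have hadj := (pvAdj_iff c y (Ne.symm hyc)).mp h1.2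
      refine ⟨⟨(y.1 - c.1, y.2 - c.2), hadj, ?_⟩, hy⟩
      rcases y with ⟨y1, y2⟩; rcases c with ⟨c1, c2⟩; simp
  · exact (pvProbe_pairwise c).filter _

-- A's pair loop, as structural recursion over the coordinate list
def pvPairLoop (g : Int × Int → Int × Int → Bool) :
    List (Int × Int) → PySem.Dict (Int × Int) (List (Int × Int)) → PySem.Dict (Int × Int) (List (Int × Int))
  | [], nb => nb
  | x :: r, nb =>
      pvPairLoop g r (r.foldl (fun nb right =>
        if g x right then
          (nb.modify x [] (fun l => l ++ [right])).modify right [] (fun l => l ++ [x])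
        else nb) nb)

theorem pvEnumerate_foldl_eq_pairLoop (g : Int × Int → Int × Int → Bool)
    (coords : List (Int × Int)) :
    ∀ (xs : List (Int × Int)) (k : Nat), xs = coords.drop k →
    ∀ nb, (PySem.List.enumerate xs (k : Int)).foldl (fun nb p =>
        (PySem.List.slice coords (some (p.1 + 1)) none).foldl (fun nb right =>
          if g p.2 right then
            (nb.modify p.2 [] (fun l => l ++ [right])).modify right [] (fun l => l ++ [p.2])
          else nb) nb) nb
      = pvPairLoop g xs nb := by
  intro xs
  induction xs with
  | nil => intro k hk nb; simp [PySem.List.enumerate, pvPairLoop]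
  | cons x r ih =>
    intro k hk nb
    rw [PySem.List.enumerate_cons, List.foldl_cons]
    have hcast : (k : Int) + 1 = ((k + 1 : Nat) : Int) := by push_cast; ring
    have hslice : PySem.List.slice coords (some ((k : Int) + 1)) none = coords.drop (k + 1) := by
      rw [hcast, PySem.List.slice_from coords (by positivity)]
      simp
    have hr : r = coords.drop (k + 1) := by
      have := congrArg List.tail hk
      simpa [List.tail_drop] using this
    rw [hcast, ih (k + 1) hr]
    rw [hcast] at hslice
    simp only [pvPairLoop]
    rw [hslice, ← hr]

theorem pvKeys_modify_mem (nb : PySem.Dict (Int × Int) (List (Int × Int))) (k : Int × Int)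
    (f : List (Int × Int) → List (Int × Int)) (hk : k ∈ nb.keys) :
    (nb.modify k [] f).keys = nb.keys := by
  rw [PySem.Dict.keys_modify, PySem.Dict.keys_insert_of_contains]
  exact (PySem.Dict.contains_iff_mem_keys nb k).mpr hk

theorem pvInner_foldl (g : Int × Int → Int × Int → Bool)
    (x : Int × Int) :
    ∀ (r : List (Int × Int)) (nb : PySem.Dict (Int × Int) (List (Int × Int))),
      r.Nodup → x ∉ r → x ∈ nb.keys → (∀ c ∈ r, c ∈ nb.keys) →
      (let nb' := r.foldl (fun nb right =>
          if g x right then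
            (nb.modify x [] (fun l => l ++ [right])).modify right [] (fun l => l ++ [x])
          else nb) nb
       nb'.keys = nb.keys ∧
       nb'.getD x [] = nb.getD x [] ++ r.filter (fun d => g x d) ∧
       (∀ c ∈ r, nb'.getD c [] = nb.getD c [] ++ (if g x c then [x] else [])) ∧
       (∀ c, c ≠ x → c ∉ r → nb'.getD c [] = nb.getD c [])) := by
  intro r
  induction r with
  | nil => intro nb _ _ _ _; simp
  | cons y r' ih =>
    intro nb hnd hxr hxk hrk
    have hxy : x ≠ y := by rintro rfl; simp at hxr
    have hxr' : x ∉ r' := fun h => hxr (List.mem_cons_of_mem _ h)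
    have hyr' : y ∉ r' := (List.nodup_cons.mp hnd).1
    have hnd' : r'.Nodup := (List.nodup_cons.mp hnd).2
    have hyk : y ∈ nb.keys := hrk y (List.mem_cons_self)
    set nb1 := if g x y then
          (nb.modify x [] (fun l => l ++ [y])).modify y [] (fun l => l ++ [x])
        else nb with hnb1
    have hkeys1 : nb1.keys = nb.keys := by
      by_cases h : g x y
      · rw [hnb1, if_pos h, pvKeys_modify_mem, pvKeys_modify_mem] <;>
          first | exact hxk | (rw [pvKeys_modify_mem _ _ _ hxk]; exact hyk)
      · rw [hnb1, if_neg h]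
    have hgx1 : nb1.getD x [] = nb.getD x [] ++ (if g x y then [y] else []) := by
      by_cases h : g x y
      · rw [hnb1, if_pos h, if_pos h, PySem.Dict.getD_modify, if_neg hxy, PySem.Dict.getD_modify, if_pos rfl]
      · simp [hnb1, h]
    have hgy1 : nb1.getD y [] = nb.getD y [] ++ (if g x y then [x] else []) := by
      by_cases h : g x y
      · rw [hnb1, if_pos h, if_pos h, PySem.Dict.getD_modify, if_pos rfl, PySem.Dict.getD_modify,
          if_neg (Ne.symm hxy)]
      · simp [hnb1, h]
    have hgo1 : ∀ c, c ≠ x → c ≠ y → nb1.getD c [] = nb.getD c [] := by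
      intro c hcx hcy
      by_cases h : g x y
      · rw [hnb1, if_pos h, PySem.Dict.getD_modify, if_neg hcy, PySem.Dict.getD_modify, if_neg hcx]
      · rw [hnb1, if_neg h]
    have hrecall := ih nb1 hnd' hxr'
      (by rw [hkeys1]; exact hxk)
      (by intro c hc; rw [hkeys1]; exact hrk c (List.mem_cons_of_mem _ hc))
    simp only at hrecall ⊢
    rw [List.foldl_cons, ← hnb1]
    obtain ⟨k2, g2x, g2r, g2o⟩ := hrecall
    refine ⟨by rw [k2, hkeys1], ?_, ?_, ?_⟩
    · rw [g2x, hgx1, List.filter_cons]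
      by_cases h : g x y <;> simp [h]
    · intro c hc
      rcases List.mem_cons.mp hc with rfl | hc'
      · rw [g2o c (Ne.symm hxy) hyr', hgy1]
      · rw [g2r c hc', hgo1 c (by rintro rfl; exact hxr (List.mem_cons_of_mem _ hc'))
            (by rintro rfl; exact hyr' hc')]
    · intro c hcx hcr
      rw [g2o c hcx (fun h => hcr (List.mem_cons_of_mem _ h)),
          hgo1 c hcx (by rintro rfl; exact hcr List.mem_cons_self)]

theorem pvPairLoop_getD (g : Int × Int → Int × Int → Bool)
    (hsymm : ∀ a b : Int × Int, a ≠ b → g a b = g b a) (coords : List (Int × Int)) (hnd : coords.Nodup) :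
    ∀ (xs done : List (Int × Int)) (nb : PySem.Dict (Int × Int) (List (Int × Int))),
      coords = done ++ xs →
      nb.keys = coords →
      (∀ c ∈ done, nb.getD c [] = coords.filter (fun d => d ≠ c && g c d)) →
      (∀ c ∈ xs, nb.getD c [] = done.filter (fun d => g c d)) →
      ((pvPairLoop g xs nb).keys = coords ∧
       ∀ c ∈ coords, (pvPairLoop g xs nb).getD c [] = coords.filter (fun d => d ≠ c && g c d)) := by
  intro xs
  induction xs with
  | nil =>
    intro done nb hsplit hkeys hdone _
    simp only [pvPairLoop]
    exact ⟨hkeys, by intro c hc; exact hdone c (by simpa [hsplit] using hc)⟩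
  | cons x r ih =>
    intro done nb hsplit hkeys hdone hxs
    -- facts from nodup
    have hnd' : (done ++ x :: r).Nodup := hsplit ▸ hnd
    have hxdone : x ∉ done := by
      intro h; rcases List.nodup_append.mp hnd' with ⟨_, _, hdisj⟩
      exact hdisj x h x List.mem_cons_self rfl
    have hxr : x ∉ r := by
      have := (List.nodup_append.mp hnd').2.1
      exact (List.nodup_cons.mp this).1
    have hrnd : r.Nodup := (List.nodup_cons.mp (List.nodup_append.mp hnd').2.1).2
    have hinner := pvInner_foldl g x r nb hrnd hxr
      (by rw [hkeys, hsplit]; exact List.mem_append_right _ List.mem_cons_self)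
      (by intro c hc; rw [hkeys, hsplit]; exact List.mem_append_right _ (List.mem_cons_of_mem _ hc))
    simp only at hinner
    obtain ⟨hk, hx, hr, ho⟩ := hinner
    set nb' := r.foldl (fun nb right =>
        if g x right then
          (nb.modify x [] (fun l => l ++ [right])).modify right [] (fun l => l ++ [x])
        else nb) nb with hnb'
    simp only [pvPairLoop, ← hnb']
    apply ih (done ++ [x]) nb' (by rw [hsplit]; simp) (by rw [hk, hkeys])
    · -- done ++ [x] all complete
      intro c hc
      rcases List.mem_append.mp hc with hcd | hcd
      · -- c ∈ done: untouched by inner loop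
        have hcx : c ≠ x := by rintro rfl; exact hxdone hcd
        have hcr : c ∉ r := by
          rcases List.nodup_append.mp hnd' with ⟨_, _, hdisj⟩
          exact fun h => hdisj c hcd c (List.mem_cons_of_mem _ h) rfl
        rw [ho c hcx hcr]; exact hdone c hcd
      · -- c = x
        have hce : c = x := List.mem_singleton.mp hcd
        rw [hce, hx, hxs x List.mem_cons_self, hsplit, List.filter_append, List.filter_cons]
        have h1 : done.filter (fun d => g x d) = done.filter (fun d => d ≠ x && g x d) := by
          apply List.filter_congr; intro d hd
          have : d ≠ x := by rintro rfl; exact hxdone hd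
          simp [this]
        have h2 : r.filter (fun d => g x d) = r.filter (fun d => d ≠ x && g x d) := by
          apply List.filter_congr; intro d hd
          have : d ≠ x := by rintro rfl; exact hxr hd
          simp [this]
        rw [← h1, ← h2]
        simp
    · -- r still partial, now including x
      intro c hc
      have hcx : c ≠ x := by rintro rfl; exact hxr hc
      rw [hr c hc, hxs c (List.mem_cons_of_mem _ hc), List.filter_append, List.filter_cons]
      simp [List.filter, hsymm c x hcx]

-- helper lemmas for the final assembly
theorem pvKeyed_items (l : List (List (String × Int))) :
    ∀ d : PySem.Dict (Int × Int) (List (String × Int)),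
      (∀ p ∈ d.items, pvKey p.2 = p.1) →
      ∀ p ∈ (l.foldl (fun d tile => d.insert (pvKey tile) tile) d).items, pvKey p.2 = p.1 := by
  induction l with
  | nil => exact fun d h => h
  | cons t l ih =>
    intro d h
    rw [List.foldl_cons]
    apply ih
    intro p hp
    rcases (PySem.Dict.mem_items_insert d (pvKey t) t p).mp hp with rfl | ⟨hp', _⟩
    · rfl
    · exact h p hp'

theorem tile_neighbors_py_spec' (tiles : List (List (String × Int))) :
    tile_neighbors_py tiles = tile_neighbors_py_alt tiles := by
  simp only [tile_neighbors_py, tile_neighbors_py_alt]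
  set L := tiles.filter pvHasXY with hL
  set M := L.map pvKey with hM
  set keyed := L.foldl (fun d tile => d.insert (pvKey tile) tile) PySem.Dict.empty with hkeyed
  set coords := keyed.keys with hcoords
  set vertices := keyed.items.foldl (fun d p => d.insert p.1 (pvTileVertices p.2)) PySem.Dict.empty with hvertices
  set neighbors0 := keyed.keys.foldl (fun d c => d.insert c ([] : List (Int × Int))) PySem.Dict.empty with hneighbors0
  -- coords = ofList M, deduplicated coordinates
  have hKeys : coords = PySem.Set.ofList M := by
    rw [hcoords, hkeyed, PySem.Dict.keys_foldl_insert_key L pvKey (fun _ t => t) PySem.Dict.empty]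
    simp [PySem.Dict.keys_empty, PySem.Set.update_nil_left, hM]
  have hnd : coords.Nodup := by rw [hKeys]; exact PySem.Set.nodup_ofList _
  -- each stored tile keys to its own coordinate
  have hitems : ∀ p ∈ keyed.items, pvKey p.2 = p.1 := by
    rw [hkeyed]; exact pvKeyed_items L PySem.Dict.empty (by simp [PySem.Dict.empty, PySem.Dict.items])
  have hkeysitems : coords = keyed.items.map (fun p => p.1) := by
    rw [hcoords]; rfl
  -- vertices dict: items, keys, lookups
  have hVitems : vertices.items = keyed.items.map (fun p => (p.1, pvTileVertices p.2)) := by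
    rw [hvertices, PySem.Dict.items_foldl_insert_fresh keyed.items (fun p => p.1)
      (fun p => pvTileVertices p.2) PySem.Dict.empty (by intro a _; simp [PySem.Dict.contains_empty])
      (by rw [← hkeysitems]; exact hnd)]
    simp [PySem.Dict.empty, PySem.Dict.items]
  have hVkeys : vertices.keys = coords := by
    show vertices.items.map (fun p => p.1) = coords
    rw [hVitems, List.map_map, hkeysitems]; rfl
  have hVert : ∀ c ∈ coords, vertices.getD c PySem.Set.empty = pvV c := by
    intro c hc
    rw [hkeysitems] at hc
    obtain ⟨p, hp, rfl⟩ := List.mem_map.mp hc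
    have hmem : (p.1, pvTileVertices p.2) ∈ vertices.items := by
      rw [hVitems]; exact List.mem_map.mpr ⟨p, hp, rfl⟩
    rw [PySem.Dict.getD_of_mem_items vertices hmem (by rw [PySem.Dict.keys] at *; rw [hVkeys]; exact hnd) _]
    rw [pvTileVertices_eq, hitems p hp]
  -- neighbors0: keys are coords, every value []
  have hN0items : neighbors0.items = coords.map (fun c => (c, ([] : List (Int × Int)))) := by
    rw [hneighbors0, PySem.Dict.items_foldl_insert_fresh keyed.keys (fun c => c)
      (fun _ => ([] : List (Int × Int))) PySem.Dict.empty (by intro a _; simp [PySem.Dict.contains_empty])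
      (by simpa using hnd)]
    simp [PySem.Dict.empty, PySem.Dict.items, hcoords]
  have hN0keys : neighbors0.keys = coords := by
    rw [hneighbors0, PySem.Dict.keys_foldl_insert keyed.keys (fun _ _ => ([] : List (Int × Int))) PySem.Dict.empty]
    rw [PySem.Dict.keys_empty, PySem.Set.update_nil_left]
    exact PySem.Set.ofList_eq_self_of_nodup _ hnd
  have hN0getD : ∀ c ∈ coords, neighbors0.getD c [] = [] := by
    intro c hc
    exact PySem.Dict.getD_of_mem_items neighbors0
      (by rw [hN0items]; exact List.mem_map.mpr ⟨c, hc, rfl⟩)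
      (by rw [PySem.Dict.keys] at *; rw [hN0keys]; exact hnd) _
  -- the port's pairwise test, as a bool-valued function of the two coordinates
  set g : Int × Int → Int × Int → Bool := fun l r =>
    decide (2 ≤ PySem.Set.len (PySem.Set.inter (vertices.getD l PySem.Set.empty)
                                               (vertices.getD r PySem.Set.empty))) with hg
  have hgadj : ∀ a ∈ coords, ∀ b ∈ coords, g a b = pvAdj a b := by
    intro a ha b hb
    rw [hg]; show decide _ = pvAdj a b
    rw [hVert a ha, hVert b hb]; rfl
  have hgfalse : ∀ a b : Int × Int, a ∉ coords ∨ b ∉ coords → g a b = false := by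
    intro a b hab
    rw [hg]; show decide _ = false
    rcases hab with h | h
    · have : vertices.getD a PySem.Set.empty = PySem.Set.empty :=
        PySem.Dict.getD_of_not_contains vertices _ (by
          rw [← Bool.not_eq_true, PySem.Dict.contains_iff_mem_keys, hVkeys]; exact h)
      rw [this]
      simp [PySem.Set.inter, PySem.Set.empty, PySem.Set.len]
    · have : vertices.getD b PySem.Set.empty = PySem.Set.empty :=
        PySem.Dict.getD_of_not_contains vertices _ (by
          rw [← Bool.not_eq_true, PySem.Dict.contains_iff_mem_keys, hVkeys]; exact h)
      rw [this]
      simp [PySem.Set.inter, PySem.Set.empty, PySem.Set.len, PySem.Set.contains, List.filter]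
  have hgsymm : ∀ a b : Int × Int, a ≠ b → g a b = g b a := by
    intro a b hab
    by_cases ha : a ∈ coords
    · by_cases hb : b ∈ coords
      · rw [hgadj a ha b hb, hgadj b hb a ha]; exact pvAdj_symm a b hab
      · rw [hgfalse a b (Or.inr hb), hgfalse b a (Or.inl hb)]
    · rw [hgfalse a b (Or.inl ha), hgfalse b a (Or.inr ha)]
  -- rewrite the port's double fold into pvPairLoop g
  have hfold :
      (PySem.List.enumerate coords).foldl (fun nb p =>
        (PySem.List.slice coords (some (p.1 + 1)) none).foldl (fun nb right =>
          if 2 ≤ PySem.Set.len (PySem.Set.inter (vertices.getD p.2 PySem.Set.empty)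
                                                (vertices.getD right PySem.Set.empty)) then
            (nb.modify p.2 [] (fun l => l ++ [right])).modify right [] (fun l => l ++ [p.2])
          else nb) nb) neighbors0
      = pvPairLoop g coords neighbors0 := by
    have hif : ∀ (nbp : PySem.Dict (Int × Int) (List (Int × Int))) (lft rgt : Int × Int),
        (if 2 ≤ PySem.Set.len (PySem.Set.inter (vertices.getD lft PySem.Set.empty)
                                               (vertices.getD rgt PySem.Set.empty)) then
          (nbp.modify lft [] (fun l => l ++ [rgt])).modify rgt [] (fun l => l ++ [lft])
        else nbp)
        = (if g lft rgt then
            (nbp.modify lft [] (fun l => l ++ [rgt])).modify rgt [] (fun l => l ++ [lft])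
          else nbp) := by
      intro nbp lft rgt
      by_cases h : 2 ≤ PySem.Set.len (PySem.Set.inter (vertices.getD lft PySem.Set.empty)
                                                      (vertices.getD rgt PySem.Set.empty)) <;>
        simp [h, hg]
    rw [show (fun (nb : PySem.Dict (Int × Int) (List (Int × Int))) (p : Int × (Int × Int)) =>
        (PySem.List.slice coords (some (p.1 + 1)) none).foldl (fun nb right =>
          if 2 ≤ PySem.Set.len (PySem.Set.inter (vertices.getD p.2 PySem.Set.empty)
                                                (vertices.getD right PySem.Set.empty)) then
            (nb.modify p.2 [] (fun l => l ++ [right])).modify right [] (fun l => l ++ [p.2])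
          else nb) nb)
      = (fun nb p =>
        (PySem.List.slice coords (some (p.1 + 1)) none).foldl (fun nb right =>
          if g p.2 right then
            (nb.modify p.2 [] (fun l => l ++ [right])).modify right [] (fun l => l ++ [p.2])
          else nb) nb) from by funext nb p; congr 1; funext nb right; exact hif nb p.2 right]
    have := pvEnumerate_foldl_eq_pairLoop g coords coords 0 (by simp) neighbors0
    simpa using this
  rw [hfold]
  -- run the invariant
  obtain ⟨hfk, hfv⟩ := pvPairLoop_getD g hgsymm coords hnd coords [] neighbors0 (by simp)
    hN0keys (by intro c hc; simp at hc) (by intro c hc; rw [hN0getD c hc]; simp)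
  -- B's coordinate list and membership set are A's coords
  have hdedup : PySem.List.dedup M = coords := by
    rw [PySem.List.dedup_eq_ofList, hKeys]
  have hofl : PySem.Set.ofList coords = coords := PySem.Set.ofList_eq_self_of_nodup _ hnd
  rw [hdedup, hofl]
  -- A's final dict, item by item
  have hfnd : (pvPairLoop g coords neighbors0).keys.Nodup := by rw [hfk]; exact hnd
  rw [PySem.Dict.items_eq_map_keys _ hfnd [], hfk, List.map_map]
  apply List.map_congr_left
  intro c hc
  simp only [Function.comp]
  rw [hfv c hc]
  have hfilt : List.filter (fun d => decide (d ≠ c) && g c d) coords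
      = List.filter (fun d => decide (d ≠ c) && pvAdj c d) coords := by
    apply List.filter_congr
    intro d hd
    rw [hgadj c hc d hd]
  rw [hfilt]
  have := pvSorted_filter_eq coords hnd c
  rw [hofl] at this
  rw [this]

-- ===== VERDICT (by name: the statement is the Claim_ definition above) =====
theorem tile_neighbors_py_spec : Claim_equal_tile_neighbors_py := by
  intro tiles _
  unfold Spec_tile_neighbors_py
  exact tile_neighbors_py_spec' tiles
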